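-- pv_equiv track=rewrite | github.com/hellojoeh/MyPoolr | bot/utils/ui_components.py | optimize_button_layout
-- ===== SOURCE A (Python) =====
-- from typing import Dict, Any, List, Optional, Tuple
--
-- def optimize_button_layout(buttons: List[Dict[str, Any]], screen_size: str) -> List[List[Dict[str, Any]]]:
--     """Optimize button layout for screen size."""
--     if screen_size == "desktop":
--         max_per_row = 4
--     elif screen_size == "tablet":
--         max_per_row = 3
--     else:  # mobile
--         max_per_row = 2
--
--     # Group buttons into rows
--     rows = []
--     for i in range(0, len(buttons), max_per_row):
--         rows.append(buttons[i:i + max_per_row])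
--
--     return rows
-- ===== SOURCE B (Python) =====
-- from typing import Dict, Any, List
--
-- def optimize_button_layout(buttons: List[Dict[str, Any]], screen_size: str) -> List[List[Dict[str, Any]]]:
--     """Optimize button layout for screen size (running-buffer accumulation)."""
--     if screen_size == "desktop":
--         max_per_row = 4
--     elif screen_size == "tablet":
--         max_per_row = 3
--     else:  # mobile
--         max_per_row = 2
--
--     rows = []
--     current = []
--     for btn in buttons:
--         current = current + [btn]
--         if len(current) == max_per_row:
--             rows = rows + [current]
--             current = []
--     if current != []:
--         rows = rows + [current]
--     return rows
-- ===== Notes on version B (the rewrite author's own statement) =====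
-- stated objective: alternative
-- what changed: Replaces index-step slicing (range(0, len, k) plus buttons[i:i+k]) with a single element-by-element pass that fills a running row buffer and flushes it when full (and once at the end if non-empty).
import Mathlib
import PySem

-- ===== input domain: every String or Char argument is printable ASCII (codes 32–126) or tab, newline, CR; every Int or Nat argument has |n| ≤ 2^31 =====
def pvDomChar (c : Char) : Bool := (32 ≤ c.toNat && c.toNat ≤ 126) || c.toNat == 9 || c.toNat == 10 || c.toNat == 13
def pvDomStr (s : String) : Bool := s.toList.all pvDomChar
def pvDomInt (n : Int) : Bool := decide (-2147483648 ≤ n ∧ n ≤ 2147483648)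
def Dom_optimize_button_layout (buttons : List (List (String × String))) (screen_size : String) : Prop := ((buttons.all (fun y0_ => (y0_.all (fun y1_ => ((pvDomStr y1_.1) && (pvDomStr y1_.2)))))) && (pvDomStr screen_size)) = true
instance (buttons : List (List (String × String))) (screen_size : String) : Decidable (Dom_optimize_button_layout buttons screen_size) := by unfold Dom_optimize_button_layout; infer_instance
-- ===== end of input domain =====

-- B replaces A's index-step slicing (range(0, len, k) + buttons[i:i+k]) with a single
-- element-by-element pass maintaining a running row buffer flushed when full (alternative decomposition).


-- ===== PORT A =====
-- literal port: range(0, len(buttons), max_per_row) loop appending slices buttons[i:i+max_per_row]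
def optimize_button_layout (buttons : List (List (String × String))) (screen_size : String) : List (List (List (String × String))) :=
  let max_per_row : Int :=
    if screen_size == "desktop" then 4
    else if screen_size == "tablet" then 3
    else 2
  let rows : List (List (List (String × String))) :=
    (PySem.List.pyRange 0 (buttons.length : Int) max_per_row).foldl
      (fun rows i => rows ++ [PySem.List.slice buttons (some i) (some (i + max_per_row))]) []
  rows

-- ===== PORT B =====
-- literal port of Source B: running buffer `current`, flushed into `rows` when it reaches max_per_row
def optimize_button_layout_alt (buttons : List (List (String × String))) (screen_size : String) : List (List (List (String × String))) :=
  let max_per_row : Int :=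
    if screen_size == "desktop" then 4
    else if screen_size == "tablet" then 3
    else 2
  let st :=
    buttons.foldl
      (fun (st : List (List (List (String × String))) × List (List (String × String))) btn =>
        let current := st.2 ++ [btn]
        if ((current.length : Int) == max_per_row) then (st.1 ++ [current], [])
        else (st.1, current))
      ([], [])
  if st.2 ≠ [] then st.1 ++ [st.2] else st.1

-- ===== PRECONDITION & SPEC =====
def Spec_optimize_button_layout (buttons : List (List (String × String))) (screen_size : String) (out : List (List (List (String × String)))) : Prop := out = optimize_button_layout_alt buttons screen_size
instance (buttons : List (List (String × String))) (screen_size : String) (out : List (List (List (String × String)))) : Decidable (Spec_optimize_button_layout buttons screen_size out) := by unfold Spec_optimize_button_layout; infer_instance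

-- ===== CLAIM (what is proved, stated in full; the proofs are below) =====
def Claim_equal_optimize_button_layout : Prop := ∀ (buttons : List (List (String × String))) (screen_size : String), Dom_optimize_button_layout buttons screen_size → Spec_optimize_button_layout buttons screen_size (optimize_button_layout buttons screen_size)

-- ===== LEMMAS AND PROOFS =====

-- Reference chunking function: both ports are proved equal to it.
def pvChunk {α : Type} (k : Nat) (xs : List α) : List (List α) :=
  if h : xs = [] ∨ k = 0 then [] else xs.take k :: pvChunk k (xs.drop k)
termination_by xs.length
decreasing_by
  simp only [not_or] at h
  have : 0 < xs.length := List.length_pos_iff.mpr h.1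
  have : 0 < k := Nat.pos_of_ne_zero h.2
  simp [List.length_drop]; omega

theorem pvChunk_nil {α : Type} (k : Nat) : pvChunk (α := α) k [] = [] := by
  rw [pvChunk]; simp

theorem pvChunk_cons {α : Type} (k : Nat) (hk : 0 < k) (xs : List α) (hx : xs ≠ []) :
    pvChunk k xs = xs.take k :: pvChunk k (xs.drop k) := by
  rw [pvChunk]; simp [hx, Nat.pos_iff_ne_zero.mp hk]

theorem foldl_append_singleton {α β : Type} (f : α → β) :
    ∀ (l : List α) (acc : List β),
      l.foldl (fun r x => r ++ [f x]) acc = acc ++ l.map f := by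
  intro l
  induction l with
  | nil => intro acc; simp
  | cons x xs ih => intro acc; simp [List.foldl_cons, ih]

-- A's slice-by-range result equals pvChunk.
theorem a_core {α : Type} (k : Nat) (hk : 0 < k) : ∀ (xs : List α),
    (List.range (if (0:Int) < (xs.length : Int) then ((((xs.length : Int)) - 0 + k - 1) / k).toNat else 0)).map
      (fun j => (xs.drop (k * j)).take k) = pvChunk k xs := by
  intro xs
  induction hn : xs.length using Nat.strong_induction_on generalizing xs with
  | _ n ih =>
  cases n with
  | zero =>
    have hx : xs = [] := List.length_eq_zero_iff.mp hn
    subst hx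
    simp [pvChunk_nil]
  | succ m =>
    have hx : xs ≠ [] := by
      intro h; subst h; simp at hn
    rw [← hn]
    have hpos : (0:Int) < (xs.length : Int) := by rw [hn]; exact_mod_cast Nat.succ_pos m
    rw [if_pos hpos]
    -- convert the Int-ediv count to a Nat division
    have hcount : ((((xs.length : Int)) - 0 + k - 1) / k).toNat = (xs.length + k - 1) / k := by
      have h1 : (((xs.length : Int)) - 0 + k - 1) = ((xs.length + k - 1 : Nat) : Int) := by
        omega
      rw [h1]
      have h2 : ((xs.length + k - 1 : Nat) : Int) / ((k : Nat) : Int) = (((xs.length + k - 1) / k : Nat) : Int) := by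
        exact_mod_cast rfl
      rw [h2, Int.toNat_natCast]
    rw [hcount]
    have hlen : 0 < xs.length := by omega
    -- (len + k - 1)/k = (len-1)/k + 1
    have hq : (xs.length + k - 1) / k = (xs.length - 1) / k + 1 := by
      have : xs.length + k - 1 = (xs.length - 1) + k := by omega
      rw [this, Nat.add_div_right _ hk]
    rw [hq, List.range_succ_eq_map, List.map_cons, List.map_map]
    rw [pvChunk_cons k hk xs hx]
    congr 1
    -- tail: reindex j ↦ j+1 and use the IH on xs.drop k
    case e_tail =>
      have hmap : ∀ j : Nat, ((fun j => (xs.drop (k * j)).take k) ∘ Nat.succ) j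
          = (fun j => ((xs.drop k).drop (k * j)).take k) j := by
        intro j
        simp only [Function.comp, List.drop_drop, Nat.mul_succ]
        congr 2
        omega
      rw [List.map_congr_left (fun j _ => hmap j)]
      have hdl : (xs.drop k).length = xs.length - k := by simp
      by_cases hle : xs.length ≤ k
      · -- drop k is empty; count on the left is 0 since (len-1)/k = 0
        have hnil : xs.drop k = [] := by
          rw [List.drop_eq_nil_iff]; omega
        have : (xs.length - 1) / k = 0 := Nat.div_eq_of_lt (by omega)
        rw [this, hnil, pvChunk_nil]; simp
      · have hlt : k < xs.length := by omega
        have := ih (xs.length - k) (by omega) (xs.drop k) (by omega)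
        have hpos' : (0:Int) < ((xs.length - k : Nat) : Int) := by
          exact_mod_cast Nat.sub_pos_of_lt hlt
        rw [if_pos hpos'] at this
        have hc2 : (((xs.length - k : Nat) : Int) - 0 + k - 1) / k
            = ((((xs.length - k + k - 1) / k : Nat)) : Int) := by
          have h1 : (((xs.length - k : Nat) : Int) - 0 + k - 1) = ((xs.length - k + k - 1 : Nat) : Int) := by
            omega
          rw [h1]
          exact_mod_cast rfl
        rw [hc2, Int.toNat_natCast] at this
        have hq2 : (xs.length - k + k - 1) / k = (xs.length - 1) / k := by
          have : xs.length - k + k - 1 = xs.length - 1 := by omega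
          rw [this]
        rw [hq2] at this
        exact this

-- A's foldl-of-slices form reduces to the map form, then to pvChunk.
theorem a_rows {α : Type} (k : Nat) (hk : 0 < k) (xs : List α) :
    (PySem.List.pyRange 0 (xs.length : Int) (k : Int)).foldl
      (fun rows i => rows ++ [PySem.List.slice xs (some i) (some (i + (k:Int)))]) []
    = pvChunk k xs := by
  have hk' : (0:Int) < (k : Int) := by exact_mod_cast hk
  rw [PySem.List.pyRange_of_pos _ _ hk']
  rw [foldl_append_singleton, List.nil_append, List.map_map]
  have hmap : ∀ j : Nat,
      ((fun i => PySem.List.slice xs (some i) (some (i + (k:Int)))) ∘ (fun j : Nat => (0:Int) + (k:Int) * j)) j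
      = (fun j : Nat => (xs.drop (k * j)).take k) j := by
    intro j
    simp only [Function.comp, zero_add]
    have h1 : (k:Int) * (j:Int) = ((k*j : Nat) : Int) := by push_cast; ring
    rw [h1, PySem.List.slice_natCast_add]
  rw [List.map_congr_left (fun j _ => hmap j)]
  have hcond : (if (0:Int) < (xs.length : Int) then (((xs.length : Int) - 0 + (k:Int) - 1) / (k:Int)).toNat else 0)
      = (if (0:Int) < (xs.length : Int) then ((((xs.length : Int)) - 0 + k - 1) / k).toNat else 0) := rfl
  rw [hcond]
  exact a_core k hk xs

-- B's running-buffer fold, with buffer cur (|cur| < k), appends pvChunk (cur ++ xs).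
theorem b_core {α : Type} (k : Nat) (hk : 0 < k) : ∀ (xs : List α)
    (rows : List (List α)) (cur : List α), cur.length < k →
    (let st := xs.foldl
        (fun (st : List (List α) × List α) btn =>
          let current := st.2 ++ [btn]
          if ((current.length : Int) == (k : Int)) then (st.1 ++ [current], [])
          else (st.1, current)) (rows, cur)
      if st.2 ≠ [] then st.1 ++ [st.2] else st.1)
    = rows ++ pvChunk k (cur ++ xs) := by
  intro xs
  induction xs with
  | nil =>
    intro rows cur hcur
    simp only [List.foldl_nil, List.append_nil]
    by_cases hc : cur = []
    · subst hc; simp [pvChunk_nil]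
    · rw [pvChunk_cons k hk cur hc]
      have ht : cur.take k = cur := List.take_of_length_le (by omega)
      have hd : cur.drop k = [] := by rw [List.drop_eq_nil_iff]; omega
      simp [hc, ht, hd, pvChunk_nil]
  | cons b rest ih =>
    intro rows cur hcur
    simp only [List.foldl_cons]
    by_cases hfull : (cur ++ [b]).length = k
    · have hbeq : (((cur ++ [b]).length : Int) == (k : Int)) = true := by
        simp [hfull]
      simp only [hbeq, if_true]
      rw [ih (rows ++ [cur ++ [b]]) [] hk]
      simp only [List.nil_append]
      have hstr : cur ++ b :: rest = (cur ++ [b]) ++ rest := by simp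
      rw [hstr, pvChunk_cons k hk ((cur ++ [b]) ++ rest) (by simp)]
      have ht : ((cur ++ [b]) ++ rest).take k = cur ++ [b] := by
        rw [List.take_append_of_le_length (by omega), List.take_of_length_le (by omega)]
      have hd : ((cur ++ [b]) ++ rest).drop k = rest := by
        rw [List.drop_append_of_le_length (by omega)]
        simp [hfull]
      rw [ht, hd]; simp
    · have hbeq : (((cur ++ [b]).length : Int) == (k : Int)) = false := by
        simp only [beq_eq_false_iff_ne, ne_eq]
        exact fun h => hfull (Nat.cast_injective h)
      simp only [hbeq, Bool.false_eq_true, if_false]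
      rw [ih rows (cur ++ [b]) (by simp at hfull ⊢; omega)]
      simp

-- ===== VERDICT (by name: the statement is the Claim_ definition above) =====
theorem optimize_button_layout_spec : Claim_equal_optimize_button_layout := by
  intro buttons screen_size _
  unfold Spec_optimize_button_layout optimize_button_layout optimize_button_layout_alt
  by_cases h1 : screen_size == "desktop" <;> by_cases h2 : screen_size == "tablet" <;>
    simp only [h1, h2, if_true, if_false, Bool.false_eq_true] <;>
  · first
    | (rw [show ((4:Int)) = ((4:Nat):Int) from rfl, a_rows 4 (by norm_num) buttons,
          b_core 4 (by norm_num) buttons [] [] (by norm_num)]; simp)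
    | (rw [show ((3:Int)) = ((3:Nat):Int) from rfl, a_rows 3 (by norm_num) buttons,
          b_core 3 (by norm_num) buttons [] [] (by norm_num)]; simp)
    | (rw [show ((2:Int)) = ((2:Nat):Int) from rfl, a_rows 2 (by norm_num) buttons,
          b_core 2 (by norm_num) buttons [] [] (by norm_num)]; simp)
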